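-- pv_equiv track=rewrite | github.com/tjcdev/leetcode | backtracking_and_recursion/meta_encrypt.py | findEncryptedWord
-- ===== SOURCE A (Python) =====
-- def findEncryptedWord(s):
--   if len(s) == 0:
--     return ""
--
--   ans = []
--   mid_idx = (len(s) // 2 + len(s) % 2) - 1
--   ans.append(s[mid_idx])
--   ans.append(findEncryptedWord(s[:mid_idx]))
--   ans.append(findEncryptedWord(s[mid_idx+1:]))
--
--   return "".join(ans)
-- ===== SOURCE B (Python) =====
-- def findEncryptedWord(s):
--   out = []
--   stack = [(0, len(s))]
--   while stack:
--     lo, hi = stack.pop()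
--     if lo >= hi:
--       continue
--     mid = lo + (hi - lo + 1) // 2 - 1
--     out.append(s[mid])
--     stack.append((mid + 1, hi))
--     stack.append((lo, mid))
--   return "".join(out)
-- ===== Notes on version B (the rewrite author's own statement) =====
-- stated objective: alternative
-- what changed: Replaced the recursion with an iterative loop over an explicit stack of (lo,hi) half-open index ranges into the original string (right half pushed before left), appending characters to one output list, so no substring slices or per-level joins are created.
import Mathlib
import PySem

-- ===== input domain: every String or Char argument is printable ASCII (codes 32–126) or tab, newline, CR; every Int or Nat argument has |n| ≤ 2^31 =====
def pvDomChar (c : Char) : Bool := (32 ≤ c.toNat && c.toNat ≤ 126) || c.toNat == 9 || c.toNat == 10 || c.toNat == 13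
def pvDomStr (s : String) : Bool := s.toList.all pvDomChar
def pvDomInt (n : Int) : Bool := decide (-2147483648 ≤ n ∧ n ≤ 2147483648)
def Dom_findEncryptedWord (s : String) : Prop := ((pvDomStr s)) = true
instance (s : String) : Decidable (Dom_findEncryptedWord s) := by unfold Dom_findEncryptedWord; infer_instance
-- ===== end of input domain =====

-- B replaces A's recursion on string slices by an iterative loop over an explicit
-- stack of (lo,hi) index ranges into the original string (objective: alternative).

-- ===== PORT A =====
-- A recurses on strings; ported via List Char. The recursion is driven by a fuel
-- counter (initially the string length, enough for every call chain) only so the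
-- definition is structural; the 0-fuel branch is never reached.
-- mid_idx = (len // 2 + len % 2) - 1 is in range (len ≥ 1), so getD never takes its
-- default; s[:mid_idx] / s[mid_idx+1:] are the nonnegative in-range slices take/drop.
def encA : Nat → List Char → List Char
  | _, [] => []
  | 0, _ :: _ => []
  | fuel + 1, c :: t =>
    let l := c :: t
    let m := (l.length / 2 + l.length % 2) - 1
    l.getD m ' ' :: (encA fuel (l.take m) ++ encA fuel (l.drop (m + 1)))

def findEncryptedWord (s : String) : String :=
  String.ofList (encA s.toList.length s.toList)

-- ===== PORT B =====
-- stack head = top of stack (Python pops/pushes at the list's end); right range is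
-- pushed below the left one, exactly as Source B pushes right then left. The while loop
-- runs at most 2*len+1 iterations (each iteration strictly decreases
-- 2*Σ(hi-lo) + |stack|), which is the fuel; the 0-fuel branch is never reached.
def loopB : Nat → List Char → List (Nat × Nat) → List Char → List Char
  | _, _, [], out => out
  | 0, _, _ :: _, out => out
  | fuel + 1, l, (lo, hi) :: rest, out =>
    if hi ≤ lo then loopB fuel l rest out
    else
      let mid := lo + (hi - lo + 1) / 2 - 1
      loopB fuel l ((lo, mid) :: (mid + 1, hi) :: rest) (out ++ [l.getD mid ' '])

def findEncryptedWord_alt (s : String) : String :=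
  String.ofList (loopB (2 * s.toList.length + 1) s.toList [(0, s.toList.length)] [])

-- ===== PRECONDITION & SPEC =====
def Spec_findEncryptedWord (s : String) (out : String) : Prop := out = findEncryptedWord_alt s
instance (s : String) (out : String) : Decidable (Spec_findEncryptedWord s out) := by unfold Spec_findEncryptedWord; infer_instance

-- ===== CLAIM (what is proved, stated in full; the proofs are below) =====
def Claim_equal_findEncryptedWord : Prop := ∀ (s : String), Dom_findEncryptedWord s → Spec_findEncryptedWord s (findEncryptedWord s)

-- ===== LEMMAS AND PROOFS =====

-- proof-only reference function: A's recursion, fuel-free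
def E : List Char → List Char
  | [] => []
  | c :: t =>
    let l := c :: t
    let m := (l.length / 2 + l.length % 2) - 1
    l.getD m ' ' :: (E (l.take m) ++ E (l.drop (m + 1)))
termination_by l => l.length
decreasing_by
  · simp only [List.length_take, List.length_cons]; omega
  · simp only [List.length_drop, List.length_cons]; omega

theorem encA_eq_E : ∀ (fuel : Nat) (l : List Char), l.length ≤ fuel → encA fuel l = E l := by
  intro fuel
  induction fuel with
  | zero =>
    intro l hl
    have : l = [] := by cases l <;> simp_all
    subst this; simp [encA, E]
  | succ f ih =>
    intro l hl
    cases l with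
    | nil => simp [encA, E]
    | cons c t =>
      rw [encA, E]
      simp only [List.length_cons] at hl ⊢
      congr 1
      congr 1
      · exact ih _ (by simp only [List.length_take, List.length_cons]; omega)
      · exact ih _ (by simp only [List.length_drop, List.length_cons]; omega)

-- the substring of l given by the half-open range [lo, hi)
def seg (l : List Char) (lo hi : Nat) : List Char := (l.drop lo).take (hi - lo)

theorem seg_empty (l : List Char) (lo hi : Nat) (h : hi ≤ lo) : seg l lo hi = [] := by
  simp [seg, Nat.sub_eq_zero_of_le h]

theorem seg_full (l : List Char) : seg l 0 l.length = l := by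
  simp [seg]

theorem seg_length (l : List Char) (lo hi : Nat) (hhi : hi ≤ l.length) :
    (seg l lo hi).length = hi - lo := by
  simp [seg]; omega

theorem seg_getD (l : List Char) (lo hi m : Nat) (h1 : m < hi - lo) :
    (seg l lo hi).getD m ' ' = l.getD (lo + m) ' ' := by
  simp only [List.getD, seg]
  rw [List.getElem?_take_of_lt h1, List.getElem?_drop]

theorem seg_take (l : List Char) (lo hi m : Nat) (h1 : m ≤ hi - lo) :
    (seg l lo hi).take m = seg l lo (lo + m) := by
  simp only [seg, List.take_take]
  congr 1; omega

theorem seg_drop (l : List Char) (lo hi m : Nat) :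
    (seg l lo hi).drop m = seg l (lo + m) hi := by
  simp only [seg, List.drop_take, List.drop_drop]
  congr 1; omega

-- splitting a nonempty range at its midpoint matches A's recursion on the segment
theorem E_seg_split (l : List Char) (lo hi : Nat) (hlt : lo < hi) (hhi : hi ≤ l.length) :
    E (seg l lo hi) =
      l.getD (lo + (hi - lo + 1) / 2 - 1) ' ' ::
        (E (seg l lo (lo + (hi - lo + 1) / 2 - 1)) ++
         E (seg l (lo + (hi - lo + 1) / 2 - 1 + 1) hi)) := by
  have hlen : (seg l lo hi).length = hi - lo := seg_length l lo hi hhi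
  have htne : seg l lo hi ≠ [] := by
    intro h; rw [h] at hlen; simp at hlen; omega
  obtain ⟨c, t', hct⟩ := List.exists_cons_of_ne_nil htne
  have hm1 : (hi - lo + 1) / 2 - 1 < hi - lo := by omega
  have hmid : lo + (hi - lo + 1) / 2 - 1 = lo + ((hi - lo + 1) / 2 - 1) := by omega
  have hmeq : ((seg l lo hi).length / 2 + (seg l lo hi).length % 2) - 1
      = (hi - lo + 1) / 2 - 1 := by rw [hlen]; omega
  have hA : E (seg l lo hi)
      = (seg l lo hi).getD ((hi - lo + 1) / 2 - 1) ' ' ::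
          (E ((seg l lo hi).take ((hi - lo + 1) / 2 - 1)) ++
           E ((seg l lo hi).drop ((hi - lo + 1) / 2 - 1 + 1))) := by
    rw [hct, E, ← hct, hmeq]
  rw [hA, seg_getD l lo hi _ hm1, seg_take l lo hi _ (by omega), seg_drop, hmid,
    ← Nat.add_assoc]

-- loop invariant: with enough fuel the loop emits, after out, A's encryption of each
-- pending range in order
theorem loopB_eq (l : List Char) :
    ∀ (fuel : Nat) (stack : List (Nat × Nat)) (out : List Char),
      (∀ r ∈ stack, r.2 ≤ l.length) →
      2 * (stack.map (fun r => r.2 - r.1)).sum + stack.length ≤ fuel →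
      loopB fuel l stack out = out ++ (stack.map (fun r => E (seg l r.1 r.2))).flatten := by
  intro fuel
  induction fuel with
  | zero =>
    intro stack out hwf hfuel
    have : stack = [] := by cases stack <;> simp_all
    subst this; simp [loopB]
  | succ f ih =>
    intro stack out hwf hfuel
    cases stack with
    | nil => simp [loopB]
    | cons r rest =>
      obtain ⟨lo, hi⟩ := r
      simp only [List.map_cons, List.sum_cons, List.length_cons] at hfuel
      by_cases hle : hi ≤ lo
      · rw [loopB]
        simp only [hle, if_true]
        rw [ih rest out (fun r hr => hwf r (List.mem_cons_of_mem _ hr)) (by omega)]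
        simp [seg_empty l lo hi hle, E]
      · have hlt : lo < hi := by omega
        have hhi : hi ≤ l.length := hwf (lo, hi) List.mem_cons_self
        rw [loopB]
        simp only [if_neg hle]
        rw [ih]
        · simp only [List.map_cons, List.flatten_cons, List.append_assoc]
          rw [E_seg_split l lo hi hlt hhi]
          simp
        · intro r hr
          simp only [List.mem_cons] at hr
          rcases hr with h | h | h
          · subst h; simp only; omega
          · subst h; exact hhi
          · exact hwf r (List.mem_cons_of_mem _ h)
        · simp only [List.map_cons, List.sum_cons, List.length_cons]
          omega

-- ===== VERDICT (by name: the statement is the Claim_ definition above) =====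
theorem findEncryptedWord_spec : Claim_equal_findEncryptedWord := by
  intro s _
  unfold Spec_findEncryptedWord findEncryptedWord findEncryptedWord_alt
  rw [loopB_eq s.toList (2 * s.toList.length + 1) [(0, s.toList.length)] []
      (by intro r hr; simp only [List.mem_singleton] at hr; simp [hr])
      (by simp only [List.map_cons, List.map_nil, List.sum_cons, List.sum_nil,
            List.length_cons, List.length_nil]; omega)]
  rw [encA_eq_E s.toList.length s.toList (le_refl _)]
  simp only [List.map_cons, List.map_nil, List.flatten_cons, List.flatten_nil,
    List.append_nil, List.nil_append, seg_full]
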